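-- pv_equiv track=rewrite | github.com/supracharger/Data-Structures-Algorithms | Algos_on_Strings/suffix_array_long.py | ComputeCharClasses
-- ===== SOURCE A (Python) =====
-- def ComputeCharClasses(S, order):
--   clss = [0] * len(S)
--   for i in range(1, len(S)):
--     if S[order[i]] != S[order[i-1]]:
--       clss[order[i]] = clss[order[i-1]] + 1
--     else:
--       clss[order[i]] = clss[order[i-1]]
--   return clss
-- ===== SOURCE B (Python) =====
-- def ComputeCharClasses(S, order):
--     n = len(S)
--     clss = [0] * n
--     if n <= 1:
--         return clss
--     # run-length encode the characters taken in sorted order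
--     runs = []  # list of (char, run_length)
--     for o in order[:n]:
--         c = S[o]
--         if runs and runs[-1][0] == c:
--             runs[-1] = (c, runs[-1][1] + 1)
--         else:
--             runs.append((c, 1))
--     # every rank inside run number g gets class g
--     labels = []
--     for g, (_, cnt) in enumerate(runs):
--         labels.extend([g] * cnt)
--     for o, g in zip(order, labels):
--         clss[o] = g
--     return clss
-- ===== Notes on version B (the rewrite author's own statement) =====
-- stated objective: alternative
-- what changed: Instead of A's single pass that carries the previous class value and cross-indexes the class array (clss[order[i]] from clss[order[i-1]]), B run-length encodes the characters taken in sorted order into (char, count) runs, labels every rank inside run number g with class g (the run's index), and scatters the labels onto the positions; no running class value and no reads of the class array exist in B.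
import Mathlib
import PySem

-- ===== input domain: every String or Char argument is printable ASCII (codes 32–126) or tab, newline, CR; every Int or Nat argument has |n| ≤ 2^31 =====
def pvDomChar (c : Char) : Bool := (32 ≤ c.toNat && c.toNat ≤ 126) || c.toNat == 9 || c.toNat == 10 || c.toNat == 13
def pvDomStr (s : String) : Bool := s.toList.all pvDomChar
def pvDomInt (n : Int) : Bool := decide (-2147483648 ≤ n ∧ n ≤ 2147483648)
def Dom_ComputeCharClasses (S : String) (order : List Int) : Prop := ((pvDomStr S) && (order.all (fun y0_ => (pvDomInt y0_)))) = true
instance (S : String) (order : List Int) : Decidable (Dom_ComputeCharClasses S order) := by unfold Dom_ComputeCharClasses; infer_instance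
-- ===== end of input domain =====

-- B replaces A's single class-carrying pass with run-length encoding of the sorted-order characters, labelling each run by its index and scattering; alternative algorithm, same cost.


-- ===== PORT A =====
-- literal transliteration of A: clss = [0]*len(S); for i in range(1, len(S)): compare S[order[i]] with
-- S[order[i-1]] and write clss[order[i]] from clss[order[i-1]]. pyGetD/pySetD are exact on Pre_ (in-range
-- possibly negative indices); outside Pre_ Python raises and nothing is claimed.
def ComputeCharClasses (S : String) (order : List Int) : List Int :=
  let cs := S.toList
  let n := cs.length
  (PySem.List.pyRange 1 (n : Int) 1).foldl (fun clss i =>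
    let oi := PySem.List.pyGetD order i 0
    let op := PySem.List.pyGetD order (i - 1) 0
    let v := if PySem.List.pyGetD cs oi ' ' ≠ PySem.List.pyGetD cs op ' '
             then PySem.List.pyGetD clss op 0 + 1
             else PySem.List.pyGetD clss op 0
    PySem.List.pySetD clss oi v) (List.replicate n 0)

-- ===== PORT B =====
-- literal transliteration of Source B: run-length encode the characters taken in order (runs, a list of
-- (char,count), last element updated in place as in Python), then labels = run index g repeated count
-- times for each run (enumerate + extend), then scatter over zip(order, labels).
def ComputeCharClasses_alt (S : String) (order : List Int) : List Int :=
  let cs := S.toList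
  let n := cs.length
  let clss : List Int := List.replicate n 0
  if n ≤ 1 then clss
  else
    let runs := (PySem.List.slice order (some 0) (some (n : Int))).foldl
      (fun (runs : List (Char × Int)) o =>
        let c := PySem.List.pyGetD cs o ' '
        match runs.getLast? with
        | some (c0, k) => if c0 = c then runs.dropLast ++ [(c, k + 1)] else runs ++ [(c, 1)]
        | none => runs ++ [(c, 1)]) []
    let labels := (PySem.List.enumerate runs).foldl
      (fun (l : List Int) p => l ++ List.replicate p.2.2.toNat p.1) []
    (order.zip labels).foldl (fun cl pr => PySem.List.pySetD cl pr.1 pr.2) clss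

-- ===== PRECONDITION & SPEC =====
-- Pre_ excludes exactly the inputs where A raises an IndexError: with n = len(S) ≥ 2, A indexes
-- order[0..n-1] and S/clss at those values, so order must have ≥ n entries and its first n entries must
-- be in-range (possibly negative) indices into S; for n ≤ 1 A touches nothing and is total.
def Pre_ComputeCharClasses (S : String) (order : List Int) : Prop :=
  S.toList.length ≤ 1 ∨
    (S.toList.length ≤ order.length ∧
      ∀ o ∈ order.take S.toList.length, PySem.Raise.InRange S.toList.length o)
instance (S : String) (order : List Int) : Decidable (Pre_ComputeCharClasses S order) := by
  unfold Pre_ComputeCharClasses PySem.Raise.InRange; infer_instance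

def pvWitness_ComputeCharClasses : String × List Int := ("abab", [1, 3, 0, 2])

def Spec_ComputeCharClasses (S : String) (order : List Int) (out : List Int) : Prop := out = ComputeCharClasses_alt S order
instance (S : String) (order : List Int) (out : List Int) : Decidable (Spec_ComputeCharClasses S order out) := by unfold Spec_ComputeCharClasses; infer_instance

-- ===== CLAIM (what is proved, stated in full; the proofs are below) =====
def Claim_equal_ComputeCharClasses : Prop := ∀ (S : String) (order : List Int), Dom_ComputeCharClasses S order → Pre_ComputeCharClasses S order → Spec_ComputeCharClasses S order (ComputeCharClasses S order)

-- ===== LEMMAS AND PROOFS =====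

-- normalised (wraparound) index, the Nat pyIdx? returns on in-range input
def pvIdx (n : Nat) (o : Int) : Nat := if 0 ≤ o then o.toNat else n - (-o).toNat

-- position written at sorted rank j, the key character there, and the running class number
def pvPos (n : Nat) (order : List Int) (j : Nat) : Nat := pvIdx n (order.getD j 0)
def pvKey (n : Nat) (cs : List Char) (order : List Int) (j : Nat) : Char :=
  cs.getD (pvPos n order j) ' '
def pvRun (n : Nat) (cs : List Char) (order : List Int) : Nat → Int
  | 0 => 0
  | j + 1 => pvRun n cs order j + (if pvKey n cs order (j + 1) ≠ pvKey n cs order j then 1 else 0)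

-- the common normal form: scatter run values onto their positions, ranks 0..m-1
def pvG (n : Nat) (cs : List Char) (order : List Int) (m : Nat) : List Int :=
  (List.range m).foldl (fun cl j => cl.set (pvPos n order j) (pvRun n cs order j)) (List.replicate n 0)

lemma pvIdx_lt (n : Nat) (o : Int) (h1 : -(n : Int) ≤ o) (h2 : o < n) :
    pvIdx n o < n := by
  unfold pvIdx; split_ifs with h <;> omega

lemma pyGetD_inrange {α : Type} (xs : List α) (o : Int) (d : α)
    (h1 : -(xs.length : Int) ≤ o) (h2 : o < xs.length) :
    PySem.List.pyGetD xs o d = xs.getD (pvIdx xs.length o) d := by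
  simp only [PySem.List.pyGetD, PySem.List.pyGet?, PySem.List.pyIdx?, pvIdx]
  split_ifs with h
  · simp [List.getD]
  · simp [List.getD]

lemma pySetD_inrange {α : Type} (xs : List α) (o : Int) (v : α)
    (h1 : -(xs.length : Int) ≤ o) (h2 : o < xs.length) :
    PySem.List.pySetD xs o v = xs.set (pvIdx xs.length o) v := by
  simp only [PySem.List.pySetD, PySem.List.pySet?, PySem.List.pyIdx?, pvIdx]
  split_ifs with h
  · simp
  · simp

-- ----- A-side -----

lemma A_inv (cs : List Char) (order : List Int)
    (hin : ∀ j, j < cs.length → PySem.Raise.InRange cs.length (order.getD j 0)) :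
    ∀ m, m < cs.length →
    ((List.range m).foldl (fun clss (k : Nat) =>
        PySem.List.pySetD clss (PySem.List.pyGetD order (1 + (k : Int)) 0)
          (if PySem.List.pyGetD cs (PySem.List.pyGetD order (1 + (k : Int)) 0) ' ' ≠
               PySem.List.pyGetD cs (PySem.List.pyGetD order (1 + (k : Int) - 1) 0) ' '
           then PySem.List.pyGetD clss (PySem.List.pyGetD order (1 + (k : Int) - 1) 0) 0 + 1
           else PySem.List.pyGetD clss (PySem.List.pyGetD order (1 + (k : Int) - 1) 0) 0))
       (List.replicate cs.length 0)) = pvG cs.length cs order (m + 1)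
    ∧ (pvG cs.length cs order (m + 1)).length = cs.length
    ∧ (pvG cs.length cs order (m + 1)).getD (pvPos cs.length order m) 0
        = pvRun cs.length cs order m := by
  intro m
  induction m with
  | zero =>
      intro hm
      have hG : pvG cs.length cs order 1 = List.replicate cs.length 0 := by
        simp [pvG, List.range_one, pvRun, List.set_replicate_self]
      refine ⟨by simp [hG], by simp [hG], ?_⟩
      rw [hG]
      simp [pvRun]
  | succ m ih =>
      intro hm
      obtain ⟨h1, h2, h3⟩ := ih (by omega)
      obtain ⟨a1, b1⟩ := hin (m + 1) hm
      obtain ⟨a0, b0⟩ := hin m (by omega)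
      rw [List.range_succ, List.foldl_append, List.foldl_cons, List.foldl_nil, h1]
      have hc1 : (1 + (m : Int)) = ((m + 1 : Nat) : Int) := by push_cast; ring
      have hc2 : ((m + 1 : Nat) : Int) - 1 = ((m : Nat) : Int) := by push_cast; ring
      rw [hc1, hc2, PySem.List.pyGetD_natCast, PySem.List.pyGetD_natCast]
      have hkey : ∀ j, PySem.Raise.InRange cs.length (order.getD j 0) →
          PySem.List.pyGetD cs (order.getD j 0) ' ' = pvKey cs.length cs order j := by
        intro j ⟨hj1, hj2⟩
        rw [pyGetD_inrange cs _ ' ' hj1 hj2]; rfl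
      rw [hkey (m + 1) ⟨a1, b1⟩, hkey m ⟨a0, b0⟩]
      have hread : PySem.List.pyGetD (pvG cs.length cs order (m + 1)) (order.getD m 0) 0
          = pvRun cs.length cs order m := by
        rw [pyGetD_inrange _ _ 0 (by rw [h2]; exact a0) (by rw [h2]; exact b0), h2]
        exact h3
      rw [hread]
      have hset : PySem.List.pySetD (pvG cs.length cs order (m + 1)) (order.getD (m + 1) 0)
            (if pvKey cs.length cs order (m + 1) ≠ pvKey cs.length cs order m
             then pvRun cs.length cs order m + 1 else pvRun cs.length cs order m)
          = (pvG cs.length cs order (m + 1)).set (pvPos cs.length order (m + 1))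
              (pvRun cs.length cs order (m + 1)) := by
        rw [pySetD_inrange _ _ _ (by rw [h2]; exact a1) (by rw [h2]; exact b1), h2]
        have : (if pvKey cs.length cs order (m + 1) ≠ pvKey cs.length cs order m
             then pvRun cs.length cs order m + 1 else pvRun cs.length cs order m)
             = pvRun cs.length cs order (m + 1) := by
          simp only [pvRun]; split_ifs <;> ring
        rw [this]; rfl
      have hGsucc : pvG cs.length cs order (m + 2)
          = (pvG cs.length cs order (m + 1)).set (pvPos cs.length order (m + 1))
              (pvRun cs.length cs order (m + 1)) := by
        unfold pvG
        rw [List.range_succ, List.foldl_append, List.foldl_cons, List.foldl_nil]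
      have hpos1 : pvPos cs.length order (m + 1) < cs.length :=
        pvIdx_lt cs.length (order.getD (m + 1) 0) a1 b1
      refine ⟨by rw [hset, hGsucc], ?_, ?_⟩
      · rw [hGsucc, List.length_set, h2]
      · rw [hGsucc]
        have hps : pvPos cs.length order (m + 1)
            < ((pvG cs.length cs order (m + 1)).set (pvPos cs.length order (m + 1))
                (pvRun cs.length cs order (m + 1))).length := by
          rw [List.length_set, h2]; exact hpos1
        rw [List.getD_eq_getElem _ _ hps]
        exact List.getElem_set_self hps

lemma take_mem_inrange (cs : List Char) (order : List Int)
    (hlen : cs.length ≤ order.length)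
    (hin : ∀ o ∈ order.take cs.length, PySem.Raise.InRange cs.length o) :
    ∀ j, j < cs.length → PySem.Raise.InRange cs.length (order.getD j 0) := by
  intro j hj
  have hjo : j < order.length := lt_of_lt_of_le hj hlen
  have hmem : order[j] ∈ order.take cs.length := by
    have hjt : j < (order.take cs.length).length := by rw [List.length_take]; omega
    have h := List.getElem_mem hjt
    rwa [List.getElem_take] at h
  rw [List.getD_eq_getElem _ _ hjo]
  exact hin _ hmem

lemma A_loop (S : String) (order : List Int)
    (hn : 2 ≤ S.toList.length)
    (hlen : S.toList.length ≤ order.length)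
    (hin : ∀ o ∈ order.take S.toList.length, PySem.Raise.InRange S.toList.length o) :
    ComputeCharClasses S order = pvG S.toList.length S.toList order S.toList.length := by
  have hin' := take_mem_inrange S.toList order hlen hin
  simp only [ComputeCharClasses]
  rw [PySem.List.pyRange_one, List.foldl_map]
  have e : (((S.toList.length : Int)) - 1).toNat = S.toList.length - 1 := by omega
  rw [e]
  have h := (A_inv S.toList order hin' (S.toList.length - 1) (by omega)).1
  have e2 : S.toList.length - 1 + 1 = S.toList.length := by omega
  rw [e2] at h
  exact h

-- ----- B-side -----

-- one step of the run-length-encoding fold of port B (the character already extracted)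
def pvStep (rs : List (Char × Int)) (c : Char) : List (Char × Int) :=
  match rs.getLast? with
  | some (c0, k) => if c0 = c then rs.dropLast ++ [(c, k + 1)] else rs ++ [(c, 1)]
  | none => rs ++ [(c, 1)]

-- labels produced by the enumerate/extend loop, starting at run index s
def pvExpandFrom (s : Int) : List (Char × Int) → List Int
  | [] => []
  | (_, k) :: rs => List.replicate k.toNat s ++ pvExpandFrom (s + 1) rs

lemma expand_foldl (rs : List (Char × Int)) : ∀ (s : Int) (l : List Int),
    (PySem.List.enumerate rs s).foldl (fun (l : List Int) p => l ++ List.replicate p.2.2.toNat p.1) l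
      = l ++ pvExpandFrom s rs := by
  induction rs with
  | nil => intro s l; simp [PySem.List.enumerate_nil, pvExpandFrom]
  | cons r rs ih =>
      intro s l
      rw [PySem.List.enumerate_cons, List.foldl_cons, ih]
      cases r with
      | mk c k => simp [pvExpandFrom]

lemma expand_append (rs : List (Char × Int)) : ∀ (s : Int) (c : Char) (k : Int),
    pvExpandFrom s (rs ++ [(c, k)]) = pvExpandFrom s rs ++ List.replicate k.toNat (s + rs.length) := by
  induction rs with
  | nil => intro s c k; simp [pvExpandFrom]
  | cons r rs ih =>
      intro s c k
      cases r with
      | mk c0 k0 =>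
          simp only [List.cons_append, pvExpandFrom, ih, List.append_assoc, List.length_cons]
          have : s + 1 + (rs.length : Int) = s + ((rs.length : Int) + 1) := by ring
          rw [this]
          norm_cast

lemma pvRun_succ (n : Nat) (cs : List Char) (order : List Int) (m : Nat) (hm : 1 ≤ m) :
    pvRun n cs order m
      = pvRun n cs order (m - 1)
        + (if pvKey n cs order m ≠ pvKey n cs order (m - 1) then 1 else 0) := by
  cases m with
  | zero => omega
  | succ j => simp [pvRun]

-- RLE invariant: after processing ranks 0..m-1, the runs end with the last key, the number of earlier
-- runs is the running class value, and expanding the runs yields exactly the class values by rank.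
lemma B_inv (n : Nat) (cs : List Char) (order : List Int) :
    ∀ m, 1 ≤ m →
    ∃ rs0 k, (1 : Int) ≤ k ∧
      ((List.range m).map (pvKey n cs order)).foldl pvStep []
          = rs0 ++ [(pvKey n cs order (m - 1), k)]
      ∧ (rs0.length : Int) = pvRun n cs order (m - 1)
      ∧ pvExpandFrom 0 (rs0 ++ [(pvKey n cs order (m - 1), k)])
          = (List.range m).map (pvRun n cs order) := by
  intro m
  induction m with
  | zero => intro h; omega
  | succ m ih =>
      intro _
      simp only [Nat.add_sub_cancel]
      cases Nat.eq_zero_or_pos m with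
      | inl h0 =>
          subst h0
          refine ⟨[], 1, le_refl 1, ?_, ?_, ?_⟩
          · simp [List.range_one, pvStep]
          · simp [pvRun]
          · simp [pvExpandFrom, List.range_one, pvRun]
      | inr hpos =>
          obtain ⟨rs0, k, hk, hfold, hlen0, hexp⟩ := ih hpos
          have hstep : ((List.range (m + 1)).map (pvKey n cs order)).foldl pvStep []
              = pvStep (rs0 ++ [(pvKey n cs order (m - 1), k)]) (pvKey n cs order m) := by
            rw [List.range_succ, List.map_append, List.foldl_append, hfold]
            simp
          have hlast : (rs0 ++ [(pvKey n cs order (m - 1), k)]).getLast?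
              = some (pvKey n cs order (m - 1), k) := by simp
          have hrun := pvRun_succ n cs order m hpos
          rw [expand_append] at hexp
          by_cases heq : pvKey n cs order (m - 1) = pvKey n cs order m
          · -- same character: the last run is extended in place, class value unchanged
            have hrun' : pvRun n cs order m = pvRun n cs order (m - 1) := by
              rw [hrun, if_neg (by simp [heq])]; ring
            refine ⟨rs0, k + 1, by omega, ?_, ?_, ?_⟩
            · rw [hstep]
              simp only [pvStep, hlast, if_pos heq, List.dropLast_concat]
            · simp [hlen0, hrun']
            · rw [expand_append]
              have hk1 : (k + 1).toNat = k.toNat + 1 := by omega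
              rw [hk1, List.replicate_succ', List.range_succ, List.map_append,
                ← List.append_assoc, hexp, List.map_singleton]
              congr 1
              simp [hrun', ← hlen0]
          · -- new character: a fresh run of length 1 is appended, class value increases by one
            have hrun' : pvRun n cs order m = pvRun n cs order (m - 1) + 1 := by
              rw [hrun, if_pos (fun h => heq h.symm)]
            refine ⟨rs0 ++ [(pvKey n cs order (m - 1), k)], 1, le_refl 1, ?_, ?_, ?_⟩
            · rw [hstep]
              simp only [pvStep, hlast, if_neg heq]
            · simp only [List.length_append, List.length_singleton]
              push_cast
              rw [hlen0, hrun']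
            · rw [expand_append, expand_append, hexp, List.range_succ, List.map_append]
              congr 1
              simp only [Int.toNat_one, List.replicate_one, List.map_singleton]
              congr 1
              rw [hrun', ← hlen0]
              simp only [List.length_append, List.length_singleton]
              push_cast
              ring

lemma zip_eq_zip_take {a b : Type} (xs : List a) (ys : List b) :
    xs.zip ys = (xs.take ys.length).zip ys := by
  induction xs generalizing ys with
  | nil => simp
  | cons x xs ih =>
      cases ys with
      | nil => simp
      | cons y ys => simp [List.zip_cons_cons, ih ys]

lemma scatter_eq (n : Nat) (cs : List Char) (order : List Int)
    (hin : ∀ j, j < n → PySem.Raise.InRange n (order.getD j 0)) :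
    ∀ (js : List Nat) (cl : List Int), cl.length = n → (∀ j ∈ js, j < n) →
    js.foldl (fun cl j => PySem.List.pySetD cl (order.getD j 0) (pvRun n cs order j)) cl
      = js.foldl (fun cl j => cl.set (pvPos n order j) (pvRun n cs order j)) cl := by
  intro js
  induction js with
  | nil => intro cl _ _; rfl
  | cons j js ih =>
      intro cl hcl hjs
      obtain ⟨a0, b0⟩ := hin j (hjs j (List.mem_cons_self ..))
      simp only [List.foldl_cons]
      rw [pySetD_inrange _ _ _ (by rw [hcl]; exact a0) (by rw [hcl]; exact b0), hcl]
      exact ih _ (by rw [List.length_set, hcl]) (fun x hx => hjs x (List.mem_cons_of_mem _ hx))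

lemma B_loop (S : String) (order : List Int)
    (hn : 2 ≤ S.toList.length)
    (hlen : S.toList.length ≤ order.length)
    (hin : ∀ o ∈ order.take S.toList.length, PySem.Raise.InRange S.toList.length o) :
    ComputeCharClasses_alt S order = pvG S.toList.length S.toList order S.toList.length := by
  have hin' := take_mem_inrange S.toList order hlen hin
  simp only [ComputeCharClasses_alt]
  rw [if_neg (by omega)]
  set cs := S.toList with hcs
  set n := cs.length with hn'
  -- the RLE fold runs over the characters at ranks 0..n-1
  rw [PySem.List.slice_zero_start, PySem.List.slice_to_natCast]
  have hkeysmap : order.take n = (List.range n).map (fun j => order.getD j 0) := by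
    apply List.ext_getElem
    · rw [List.length_take, List.length_map, List.length_range]; omega
    · intro j hj1 hj2
      have hjn : j < n := by rw [List.length_take] at hj1; omega
      have hjo : j < order.length := lt_of_lt_of_le hjn hlen
      rw [List.getElem_take, List.getElem_map, List.getElem_range,
        List.getD_eq_getElem _ _ hjo]
  have hfoldfun : (order.take n).foldl
        (fun (runs : List (Char × Int)) o =>
          let c := PySem.List.pyGetD cs o ' '
          match runs.getLast? with
          | some (c0, k) => if c0 = c then runs.dropLast ++ [(c, k + 1)] else runs ++ [(c, 1)]
          | none => runs ++ [(c, 1)]) []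
      = ((List.range n).map (pvKey n cs order)).foldl pvStep [] := by
    rw [hkeysmap, List.foldl_map, List.foldl_map]
    apply PySem.List.foldl_congr_mem
    intro rs j hj
    have hjn : j < n := List.mem_range.mp hj
    obtain ⟨a0, b0⟩ := hin' j hjn
    show (let c := PySem.List.pyGetD cs (order.getD j 0) ' '
          match rs.getLast? with
          | some (c0, k) => if c0 = c then rs.dropLast ++ [(c, k + 1)] else rs ++ [(c, 1)]
          | none => rs ++ [(c, 1)]) = pvStep rs (pvKey n cs order j)
    rw [show PySem.List.pyGetD cs (order.getD j 0) ' ' = pvKey n cs order j by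
      rw [pyGetD_inrange cs _ ' ' a0 b0]; rfl]
    rfl
  rw [hfoldfun]
  obtain ⟨rs0, k, hk, hfold, hlen0, hexp⟩ := B_inv n cs order n (by omega)
  rw [hfold, expand_foldl, List.nil_append, hexp]
  -- scatter: zip(order, labels) walks ranks 0..n-1 in order
  rw [zip_eq_zip_take order ((List.range n).map (pvRun n cs order))]
  rw [List.length_map, List.length_range]
  have hziplist : (order.take n).zip ((List.range n).map (pvRun n cs order))
      = (List.range n).map (fun j => (order.getD j 0, pvRun n cs order j)) := by
    apply List.ext_getElem
    · simp [List.length_zip, List.length_take]; omega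
    · intro j hj1 hj2
      have hjn : j < n := by
        simp only [List.length_map, List.length_range] at hj2; exact hj2
      have hjo : j < order.length := lt_of_lt_of_le hjn hlen
      rw [List.getElem_zip, List.getElem_map, List.getElem_take, List.getElem_map,
        List.getElem_range]
      rw [List.getD_eq_getElem _ _ hjo]
  rw [hziplist, List.foldl_map]
  exact scatter_eq n cs order hin' (List.range n) (List.replicate n 0)
    (List.length_replicate) (fun j hj => List.mem_range.mp hj)

-- ===== VERDICT (by name: the statement is the Claim_ definition above) =====
theorem ComputeCharClasses_spec : Claim_equal_ComputeCharClasses := by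
  intro S order _ hpre
  unfold Spec_ComputeCharClasses
  by_cases h1 : S.toList.length ≤ 1
  · -- n ≤ 1: A's loop is empty, B takes the guard branch; both are replicate n 0
    simp only [ComputeCharClasses, ComputeCharClasses_alt]
    rw [if_pos h1, PySem.List.pyRange_one_eq_nil (by exact_mod_cast h1)]
    rfl
  · rcases hpre with h | ⟨hlen, hin⟩
    · omega
    · rw [A_loop S order (by omega) hlen hin, B_loop S order (by omega) hlen hin]
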